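-- pv_equiv track=rewrite | github.com/julianbrooke/LatticeFS | multi_helper.py | get_multi_id_range_both_one_word
-- ===== SOURCE A (Python) =====
-- def get_multi_id_range_both_one_word(POSes,sentence,start,end,word_loc):
--     if sentence[word_loc] == -2:
--         return 0
--     final = 0
--     for i in range(end -1, start -1,-1):
--         if POSes[i] == -2:
--             return 0
--         if i == word_loc:
--             final = final << 18 | sentence[i]
--         final = final << 18 | POSes[i]
--     return final
-- ===== SOURCE B (Python) =====
-- def get_multi_id_range_both_one_word(POSes, sentence, start, end, word_loc):
--     if sentence[word_loc] == -2:
--         return 0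
--     # validation pass: scan the covered POS tags (same descending order as A
--     # visits them) and bail out on the -2 sentinel before building anything
--     if any(POSes[i] == -2 for i in range(end - 1, start - 1, -1)):
--         return 0
--     # build the 18-bit fields low-to-high; the word id sits immediately
--     # above POSes[word_loc]
--     fields = []
--     for i in range(start, end):
--         fields.append(POSes[i])
--         if i == word_loc:
--             fields.append(sentence[i])
--     # assemble by positional shifts, highest field first
--     final = 0
--     for f in reversed(fields):
--         final = (final << 18) | f
--     return final
-- ===== Notes on version B (the rewrite author's own statement) =====
-- stated objective: alternative
-- what changed: Replaces A's fused descending shift-accumulate loop by a separate validation scan for the -2 sentinel, then an ascending construction of the list of 18-bit fields, then a final assembly loop over the reversed field list.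
import Mathlib
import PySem

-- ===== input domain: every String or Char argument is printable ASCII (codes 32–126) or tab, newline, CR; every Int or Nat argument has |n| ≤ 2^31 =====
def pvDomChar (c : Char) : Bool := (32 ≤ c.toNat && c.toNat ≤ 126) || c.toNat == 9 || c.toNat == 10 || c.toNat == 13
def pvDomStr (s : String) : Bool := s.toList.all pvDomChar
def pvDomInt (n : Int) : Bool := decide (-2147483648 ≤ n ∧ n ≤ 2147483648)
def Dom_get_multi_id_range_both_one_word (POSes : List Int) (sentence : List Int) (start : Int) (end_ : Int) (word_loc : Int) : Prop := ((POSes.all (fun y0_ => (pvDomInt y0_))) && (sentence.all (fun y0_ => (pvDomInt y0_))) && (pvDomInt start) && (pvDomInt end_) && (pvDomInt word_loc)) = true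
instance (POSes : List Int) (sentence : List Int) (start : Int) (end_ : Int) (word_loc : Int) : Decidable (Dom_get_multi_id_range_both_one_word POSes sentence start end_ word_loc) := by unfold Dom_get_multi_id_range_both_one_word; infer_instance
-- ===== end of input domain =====

-- B separates A's fused descending shift-accumulate loop into a validation scan,
-- an ascending construction of the 18-bit field list, and a final assembly loop.

-- ===== PORT A =====
-- A's descending for-loop over range(end-1, start-1, -1), counter i, early return 0 on a -2 POS tag
def pvLoopA (POSes : List Int) (sentence : List Int) (word_loc : Int) (stop : Int) (i : Int) (final : Int) : Int :=
  if h : stop < i then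
    if PySem.List.pyGetD POSes i 0 = -2 then 0
    else
      let final1 := if i = word_loc then PySem.Int.bor (final <<< (18 : Nat)) (PySem.List.pyGetD sentence i 0) else final
      pvLoopA POSes sentence word_loc stop (i - 1) (PySem.Int.bor (final1 <<< (18 : Nat)) (PySem.List.pyGetD POSes i 0))
  else final
termination_by (i - stop).toNat
decreasing_by omega

def get_multi_id_range_both_one_word (POSes : List Int) (sentence : List Int) (start : Int) (end_ : Int) (word_loc : Int) : Int :=
  if PySem.List.pyGetD sentence word_loc 0 = -2 then 0
  else pvLoopA POSes sentence word_loc (start - 1) (end_ - 1) 0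

-- ===== PORT B =====
-- B's validation scan: any(POSes[i] == -2 for i in range(end-1, start-1, -1))
def pvAnyNeg2 (POSes : List Int) (stop : Int) (i : Int) : Bool :=
  if h : stop < i then
    (PySem.List.pyGetD POSes i 0 == -2) || pvAnyNeg2 POSes stop (i - 1)
  else false
termination_by (i - stop).toNat
decreasing_by omega

-- B's field-building loop: ascending i from start to end-1, POSes[i] then (if i == word_loc) sentence[i]
def pvFieldsB (POSes : List Int) (sentence : List Int) (word_loc : Int) (end_ : Int) (i : Int) : List Int :=
  if _h : i < end_ then
    (if i = word_loc then [PySem.List.pyGetD POSes i 0, PySem.List.pyGetD sentence i 0]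
     else [PySem.List.pyGetD POSes i 0]) ++ pvFieldsB POSes sentence word_loc end_ (i + 1)
  else []
termination_by (end_ - i).toNat
decreasing_by omega

def get_multi_id_range_both_one_word_alt (POSes : List Int) (sentence : List Int) (start : Int) (end_ : Int) (word_loc : Int) : Int :=
  if PySem.List.pyGetD sentence word_loc 0 = -2 then 0
  -- validation pass: bail out on the -2 sentinel before building anything
  else if pvAnyNeg2 POSes (start - 1) (end_ - 1) then 0
  else
    -- build the 18-bit fields low-to-high, then assemble by positional shifts, highest field first
    (pvFieldsB POSes sentence word_loc end_ start).reverse.foldl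
      (fun final f => PySem.Int.bor (final <<< (18 : Nat)) f) 0

-- ===== PRECONDITION & SPEC =====
-- Pre_ excludes exactly the inputs on which the Python raises IndexError: word_loc
-- outside sentence, or an out-of-range index reached by the descending scan before
-- any early return (the -2 sentinel at the top, or an in-range -2 POS tag met first).
def Pre_get_multi_id_range_both_one_word (POSes : List Int) (sentence : List Int) (start : Int) (end_ : Int) (word_loc : Int) : Prop :=
  PySem.Raise.InRange sentence.length word_loc ∧
  (PySem.List.pyGetD sentence word_loc 0 = -2 ∨ end_ ≤ start ∨
    (end_ - 1 < (POSes.length : Int) ∧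
      (-(POSes.length : Int) ≤ start ∨
        ∃ j ∈ PySem.List.pyRange (-(POSes.length : Int)) (min end_ (POSes.length : Int)) 1, PySem.List.pyGetD POSes j 0 = -2)))
instance (POSes : List Int) (sentence : List Int) (start : Int) (end_ : Int) (word_loc : Int) : Decidable (Pre_get_multi_id_range_both_one_word POSes sentence start end_ word_loc) := by unfold Pre_get_multi_id_range_both_one_word; infer_instance

def pvWitness_get_multi_id_range_both_one_word : List Int × List Int × Int × Int × Int := ([1, 2, 3], [4, 5, 6], 0, 3, 1)

def Spec_get_multi_id_range_both_one_word (POSes : List Int) (sentence : List Int) (start : Int) (end_ : Int) (word_loc : Int) (out : Int) : Prop := out = get_multi_id_range_both_one_word_alt POSes sentence start end_ word_loc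
instance (POSes : List Int) (sentence : List Int) (start : Int) (end_ : Int) (word_loc : Int) (out : Int) : Decidable (Spec_get_multi_id_range_both_one_word POSes sentence start end_ word_loc out) := by unfold Spec_get_multi_id_range_both_one_word; infer_instance

-- ===== CLAIM (what is proved, stated in full; the proofs are below) =====
def Claim_equal_get_multi_id_range_both_one_word : Prop := ∀ (POSes : List Int) (sentence : List Int) (start : Int) (end_ : Int) (word_loc : Int), Dom_get_multi_id_range_both_one_word POSes sentence start end_ word_loc → Pre_get_multi_id_range_both_one_word POSes sentence start end_ word_loc → Spec_get_multi_id_range_both_one_word POSes sentence start end_ word_loc (get_multi_id_range_both_one_word POSes sentence start end_ word_loc)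

-- ===== LEMMAS AND PROOFS =====

-- A's loop returns 0 as soon as it meets a -2 POS tag
theorem pvLoopA_zero (POSes sentence : List Int) (word_loc stop : Int) :
    ∀ (n : Nat) (i final : Int), (i - stop).toNat = n →
    (∃ k ∈ PySem.List.pyRange i stop (-1), PySem.List.pyGetD POSes k 0 = -2) →
    pvLoopA POSes sentence word_loc stop i final = 0 := by
  intro n
  induction n with
  | zero =>
    intro i final hn h
    have hle : i ≤ stop := by omega
    rw [PySem.List.pyRange_neg_one_eq_nil hle] at h
    rcases h with ⟨k, hk, _⟩; cases hk
  | succ n ih =>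
    intro i final hn h
    have hlt : stop < i := by omega
    rcases h with ⟨k, hk, hv⟩
    rw [PySem.List.pyRange_neg_one_cons hlt] at hk
    rw [pvLoopA]
    simp only [dif_pos hlt]
    by_cases ha : PySem.List.pyGetD POSes i 0 = -2
    · simp [ha]
    · rcases List.mem_cons.mp hk with rfl | hmem
      · exact absurd hv ha
      · simp only [ha, ite_false]
        exact ih _ _ (by omega) ⟨k, hmem, hv⟩

-- with no -2 tag, A's loop is a fold of shift-or over the per-index fields (high first)
theorem pvLoopA_fold (POSes sentence : List Int) (word_loc stop : Int) :
    ∀ (n : Nat) (i final : Int), (i - stop).toNat = n →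
    (∀ k ∈ PySem.List.pyRange i stop (-1), PySem.List.pyGetD POSes k 0 ≠ -2) →
    pvLoopA POSes sentence word_loc stop i final =
      ((PySem.List.pyRange i stop (-1)).flatMap (fun k =>
        ((if k = word_loc then [PySem.List.pyGetD POSes k 0, PySem.List.pyGetD sentence k 0]
          else [PySem.List.pyGetD POSes k 0]) : List Int).reverse)).foldl
        (fun final f => PySem.Int.bor (final <<< (18 : Nat)) f) final := by
  intro n
  induction n with
  | zero =>
    intro i final hn _
    have hle : i ≤ stop := by omega
    rw [pvLoopA, PySem.List.pyRange_neg_one_eq_nil hle]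
    simp [not_lt.mpr hle]
  | succ n ih =>
    intro i final hn h
    have hlt : stop < i := by omega
    have hcons := PySem.List.pyRange_neg_one_cons (a := i) (b := stop) hlt
    have ha : PySem.List.pyGetD POSes i 0 ≠ -2 := by
      refine h i ?_
      rw [hcons]; exact List.mem_cons_self ..
    rw [pvLoopA]
    simp only [dif_pos hlt, ha, ite_false, hcons, List.flatMap_cons, List.foldl_append]
    rw [ih _ _ (by omega) (fun k hk => h k (by rw [hcons]; exact List.mem_cons_of_mem _ hk))]
    by_cases hw : i = word_loc <;> simp [hw, List.foldl]

-- B's validation scan equals an 'any' over the descending index range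
theorem pvAnyNeg2_any (POSes : List Int) (stop : Int) :
    ∀ (n : Nat) (i : Int), (i - stop).toNat = n →
    pvAnyNeg2 POSes stop i =
      (PySem.List.pyRange i stop (-1)).any (fun k => PySem.List.pyGetD POSes k 0 == -2) := by
  intro n
  induction n with
  | zero =>
    intro i hn
    have hle : i ≤ stop := by omega
    rw [pvAnyNeg2, PySem.List.pyRange_neg_one_eq_nil hle]
    simp [not_lt.mpr hle]
  | succ n ih =>
    intro i hn
    have hlt : stop < i := by omega
    rw [pvAnyNeg2, PySem.List.pyRange_neg_one_cons hlt]
    simp only [dif_pos hlt, List.any_cons]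
    rw [ih _ (by omega)]

-- B's field-building loop equals a flatMap over the ascending index range
theorem pvFieldsB_flatMap (POSes sentence : List Int) (word_loc end_ : Int) :
    ∀ (n : Nat) (i : Int), (end_ - i).toNat = n →
    pvFieldsB POSes sentence word_loc end_ i =
      (PySem.List.pyRange i end_ 1).flatMap (fun k =>
        if k = word_loc then [PySem.List.pyGetD POSes k 0, PySem.List.pyGetD sentence k 0]
        else [PySem.List.pyGetD POSes k 0]) := by
  intro n
  induction n with
  | zero =>
    intro i hn
    have hle : end_ ≤ i := by omega
    rw [pvFieldsB, PySem.List.pyRange_one_eq_nil hle]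
    simp [not_lt.mpr hle]
  | succ n ih =>
    intro i hn
    have hlt : i < end_ := by omega
    rw [pvFieldsB, PySem.List.pyRange_one_cons hlt]
    simp only [dif_pos hlt, List.flatMap_cons]
    rw [ih _ (by omega)]

-- ===== VERDICT (by name: the statement is the Claim_ definition above) =====
theorem get_multi_id_range_both_one_word_spec : Claim_equal_get_multi_id_range_both_one_word := by
  intro POSes sentence start end_ word_loc _ _
  unfold Spec_get_multi_id_range_both_one_word
  unfold get_multi_id_range_both_one_word get_multi_id_range_both_one_word_alt
  by_cases hs : PySem.List.pyGetD sentence word_loc 0 = -2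
  · simp [hs]
  · simp only [hs, ite_false]
    rw [pvAnyNeg2_any POSes (start - 1) _ (end_ - 1) rfl]
    by_cases hex : ∃ k ∈ PySem.List.pyRange (end_ - 1) (start - 1) (-1), PySem.List.pyGetD POSes k 0 = -2
    · have hany : (PySem.List.pyRange (end_ - 1) (start - 1) (-1)).any (fun k => PySem.List.pyGetD POSes k 0 == -2) = true := by
        rcases hex with ⟨k, hk, hv⟩
        exact List.any_eq_true.mpr ⟨k, hk, by simpa using hv⟩
      rw [hany, if_pos rfl]
      exact pvLoopA_zero _ _ _ _ _ _ _ rfl hex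
    · have hany : (PySem.List.pyRange (end_ - 1) (start - 1) (-1)).any (fun k => PySem.List.pyGetD POSes k 0 == -2) = false := by
        rw [List.any_eq_false]
        intro k hk
        simpa using fun hv => hex ⟨k, hk, hv⟩
      rw [hany]
      simp only [Bool.false_eq_true, ite_false]
      rw [pvLoopA_fold _ _ _ _ _ _ _ rfl (fun k hk hv => hex ⟨k, hk, hv⟩)]
      rw [pvFieldsB_flatMap POSes sentence word_loc end_ _ start rfl]
      have hrev : PySem.List.pyRange (end_ - 1) (start - 1) (-1) = (PySem.List.pyRange start end_ 1).reverse := by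
        rw [PySem.List.pyRange_neg_one_eq_reverse]
        congr 1
        ring_nf
      rw [hrev, List.reverse_flatMap]
      rfl
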